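-- pv_equiv track=rewrite | github.com/thortle/AI-media-sorter | photo-server/app/search.py | check_word_proximity
-- ===== SOURCE A (Python) =====
-- def check_word_proximity(description: str, words: list[str], max_distance: int = 3) -> bool:
--     """
--     Check if all query words appear within max_distance words of each other.
--
--     For "pink hair" query:
--     - "vibrant pink hair" -> True (adjacent)
--     - "dark brown hair...pink shirt" -> False (too far apart)
--     """
--     if len(words) <= 1:
--         return True
--
--     # Tokenize description into words
--     desc_words = description.lower().split()
--
--     # Find all positions of each query word
--     positions = {}
--     for word in words:
--         positions[word] = []
--         for i, desc_word in enumerate(desc_words):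
--             # Check if query word is contained in description word
--             if word in desc_word:
--                 positions[word].append(i)
--
--     # Check if any word is missing
--     for word in words:
--         if not positions[word]:
--             return False
--
--     # For two words, check if any pair is within max_distance
--     if len(words) == 2:
--         for pos1 in positions[words[0]]:
--             for pos2 in positions[words[1]]:
--                 if abs(pos1 - pos2) <= max_distance:
--                     return True
--         return False
--
--     # For 3+ words, check if all can be found within a window of max_distance
--     # Use the first word as anchor and check if others are nearby
--     for anchor_pos in positions[words[0]]:
--         all_nearby = True
--         for other_word in words[1:]:
--             found_nearby = False
--             for other_pos in positions[other_word]: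
--                 if abs(anchor_pos - other_pos) <= max_distance:
--                     found_nearby = True
--                     break
--             if not found_nearby:
--                 all_nearby = False
--                 break
--         if all_nearby:
--             return True
--
--     return False
-- ===== SOURCE B (Python) =====
-- def check_word_proximity(description: str, words: list[str], max_distance: int = 3) -> bool:
--     """Same result as A, but the proximity phase is a two-pointer sweep over the
--     (naturally sorted) position lists instead of nested all-pairs scans."""
--     if len(words) <= 1:
--         return True
--
--     desc_words = description.lower().split()
--     anchors = [i for i, dw in enumerate(desc_words) if words[0] in dw]
--     if not anchors:
--         return False
--
--     for w in words[1:]: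
--         ps = [i for i, dw in enumerate(desc_words) if w in dw]
--         if not ps:
--             return False
--         good = []
--         j = 0
--         n = len(ps)
--         for a in anchors:
--             while j < n and ps[j] < a - max_distance:
--                 j += 1
--             if j < n and ps[j] <= a + max_distance:
--                 good.append(a)
--         anchors = good
--
--     return bool(anchors)
-- ===== Notes on version B (the rewrite author's own statement) =====
-- stated objective: faster
-- what changed: B replaces A's all-pairs / anchor-times-positions nested scans in the proximity phase by a single two-pointer sweep per query word over the naturally sorted position lists, filtering the surviving anchors word by word.
import Mathlib
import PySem

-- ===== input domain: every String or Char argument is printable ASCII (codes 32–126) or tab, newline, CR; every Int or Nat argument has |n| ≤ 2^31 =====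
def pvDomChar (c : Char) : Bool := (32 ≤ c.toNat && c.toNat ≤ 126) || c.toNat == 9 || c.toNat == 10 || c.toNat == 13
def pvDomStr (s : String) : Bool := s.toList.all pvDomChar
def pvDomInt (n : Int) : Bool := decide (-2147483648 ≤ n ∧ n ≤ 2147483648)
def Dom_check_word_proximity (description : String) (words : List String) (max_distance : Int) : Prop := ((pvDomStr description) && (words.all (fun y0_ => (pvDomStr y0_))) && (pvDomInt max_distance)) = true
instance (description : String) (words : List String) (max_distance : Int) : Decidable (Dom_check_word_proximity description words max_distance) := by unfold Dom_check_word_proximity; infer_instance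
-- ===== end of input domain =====

-- B replaces A's all-pairs proximity scans by a two-pointer sweep per query word over the
-- (naturally sorted) position lists; equivalence is proved on all inputs (A is total).

-- ===== PORT A =====
-- positions[word]: started as [] and appended to while scanning enumerate(desc_words);
-- ported as building that same append-loop list, then inserting it for the word.
def pvPosListA (desc_words : List String) (w : String) : List Int :=
  (PySem.List.enumerate desc_words).foldl
    (fun acc p => if PySem.Str.isIn w p.2 then acc ++ [p.1] else acc) []

def check_word_proximity (description : String) (words : List String) (max_distance : Int) : Bool :=
  if words.length ≤ 1 then true
  else
    let desc_words := PySem.Str.split₀ (PySem.Str.lower description)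
    let positions : PySem.Dict String (List Int) :=
      words.foldl (fun d word => d.insert word (pvPosListA desc_words word)) PySem.Dict.empty
    if words.any (fun word => (positions.getD word []).isEmpty) then false
    else
      match words with
      | [] => true
      | w0 :: rest =>
        if words.length == 2 then
          (positions.getD w0 []).any (fun pos1 =>
            (positions.getD (rest.headD "") []).any (fun pos2 =>
              decide (|pos1 - pos2| ≤ max_distance)))
        else
          (positions.getD w0 []).any (fun anchor_pos =>
            rest.all (fun other_word =>
              (positions.getD other_word []).any (fun other_pos =>
                decide (|anchor_pos - other_pos| ≤ max_distance))))

-- ===== PORT B =====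
-- [i for i, dw in enumerate(desc_words) if w in dw]
def pvPosListB (desc_words : List String) (w : String) : List Int :=
  ((PySem.List.enumerate desc_words).filter (fun p => PySem.Str.isIn w p.2)).map (fun p => p.1)

-- while j < n and ps[j] < lo: j += 1
def pvAdvance (ps : List Int) (lo : Int) (j : Nat) : Nat :=
  if h : j < ps.length ∧ ps.getD j 0 < lo then pvAdvance ps lo (j + 1) else j
  termination_by ps.length - j
  decreasing_by omega

-- for a in anchors: advance j; if j < n and ps[j] <= a + d: good.append(a)
def pvSweep (ps : List Int) (d : Int) : List Int → Nat → List Int → List Int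
  | [], _, good => good
  | a :: as, j, good =>
    let j' := pvAdvance ps (a - d) j
    if j' < ps.length ∧ ps.getD j' 0 ≤ a + d then pvSweep ps d as j' (good ++ [a])
    else pvSweep ps d as j' good

-- for w in words[1:]: … anchors = good   (early return False on a missing word)
def pvLoopB (desc_words : List String) (d : Int) : List String → List Int → Bool
  | [], anchors => !anchors.isEmpty
  | w :: ws, anchors =>
    let ps := pvPosListB desc_words w
    if ps.isEmpty then false
    else pvLoopB desc_words d ws (pvSweep ps d anchors 0 [])

def check_word_proximity_alt (description : String) (words : List String) (max_distance : Int) : Bool :=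
  if words.length ≤ 1 then true
  else
    match words with
    | [] => true
    | w0 :: rest =>
      let desc_words := PySem.Str.split₀ (PySem.Str.lower description)
      let anchors := pvPosListB desc_words w0
      if anchors.isEmpty then false
      else pvLoopB desc_words max_distance rest anchors

-- ===== PRECONDITION & SPEC =====
def Spec_check_word_proximity (description : String) (words : List String) (max_distance : Int) (out : Bool) : Prop := out = check_word_proximity_alt description words max_distance
instance (description : String) (words : List String) (max_distance : Int) (out : Bool) : Decidable (Spec_check_word_proximity description words max_distance out) := by unfold Spec_check_word_proximity; infer_instance

-- ===== CLAIM (what is proved, stated in full; the proofs are below) =====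
def Claim_equal_check_word_proximity : Prop := ∀ (description : String) (words : List String) (max_distance : Int), Dom_check_word_proximity description words max_distance → Spec_check_word_proximity description words max_distance (check_word_proximity description words max_distance)

-- ===== LEMMAS AND PROOFS =====

lemma pvPosList_eq (dws : List String) (w : String) : pvPosListA dws w = pvPosListB dws w := by
  unfold pvPosListA pvPosListB
  rw [PySem.List.foldl_append_if, List.nil_append]

lemma pvPosListB_pairwise (dws : List String) (w : String) :
    (pvPosListB dws w).Pairwise (· < ·) := by
  have h := PySem.List.pairwise_lt_enumerate dws 0
  exact (h.filter _).map _ (fun a b hab => hab)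

lemma pvAnyCongr {α : Type} (l : List α) (p q : α → Bool) (h : ∀ a ∈ l, p a = q a) :
    l.any p = l.any q := by
  induction l with
  | nil => rfl
  | cons x xs ih =>
    simp only [List.any_cons, h x (by simp), ih (fun a ha => h a (by simp [ha]))]

lemma pvAllCongr {α : Type} (l : List α) (p q : α → Bool) (h : ∀ a ∈ l, p a = q a) :
    l.all p = l.all q := by
  induction l with
  | nil => rfl
  | cons x xs ih =>
    simp only [List.all_cons, h x (by simp), ih (fun a ha => h a (by simp [ha]))]

lemma pvDict_getD (dws : List String) (words : List String) (u : String) :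
    ∀ d : PySem.Dict String (List Int),
      (words.foldl (fun d word => d.insert word (pvPosListA dws word)) d).getD u []
        = if u ∈ words then pvPosListB dws u else d.getD u [] := by
  induction words with
  | nil => intro d; simp
  | cons w ws ih =>
    intro d
    simp only [List.foldl_cons, ih, PySem.Dict.getD_insert, List.mem_cons]
    by_cases h1 : u ∈ ws <;> by_cases h2 : u = w <;>
      simp [h1, h2, pvPosList_eq]

lemma pvAdvance_inv (ps : List Int) (lo : Int) (j : Nat)
    (h0 : ∀ k < j, ps.getD k 0 < lo) :
    ∀ k < pvAdvance ps lo j, ps.getD k 0 < lo := by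
  fun_induction pvAdvance ps lo j with
  | case1 j h ih =>
    apply ih
    intro k hk
    rcases Nat.lt_succ_iff_lt_or_eq.mp hk with h' | h'
    · exact h0 k h'
    · subst h'; exact h.2
  | case2 j h => exact h0

lemma pvAdvance_stop (ps : List Int) (lo : Int) (j : Nat) :
    pvAdvance ps lo j < ps.length → ¬ ps.getD (pvAdvance ps lo j) 0 < lo := by
  fun_induction pvAdvance ps lo j with
  | case1 j h ih => exact ih
  | case2 j h => intro h1 h2; exact h ⟨h1, h2⟩

lemma pvGetD_mono (ps : List Int) (hps : ps.Pairwise (· < ·)) {i k : Nat}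
    (hik : i ≤ k) (hk : k < ps.length) : ps.getD i 0 ≤ ps.getD k 0 := by
  rcases Nat.lt_or_ge i k with h | h
  · have := (List.pairwise_iff_getElem.mp hps) i k (by omega) hk h
    rw [List.getD_eq_getElem ps 0 (by omega), List.getD_eq_getElem ps 0 hk]
    omega
  · have : i = k := by omega
    subst this; rfl

-- the stopped two-pointer test decides "some position of ps is within d of a"
lemma pvCond_iff (ps : List Int) (d a : Int) (j' : Nat)
    (hps : ps.Pairwise (· < ·))
    (hinv : ∀ k < j', ps.getD k 0 < a - d)
    (hstop : j' < ps.length → ¬ ps.getD j' 0 < a - d) :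
    (j' < ps.length ∧ ps.getD j' 0 ≤ a + d) ↔ ps.any (fun p => decide (|a - p| ≤ d)) = true := by
  constructor
  · rintro ⟨h1, h2⟩
    have hmem : ps.getD j' 0 ∈ ps := by
      rw [List.getD_eq_getElem ps 0 h1]; exact List.getElem_mem h1
    have h3 := hstop h1
    refine List.any_eq_true.mpr ⟨ps.getD j' 0, hmem, ?_⟩
    simp only [decide_eq_true_eq, abs_le]; omega
  · intro h
    rcases List.any_eq_true.mp h with ⟨p, hp, hnear⟩
    simp only [decide_eq_true_eq, abs_le] at hnear
    rcases List.getElem_of_mem hp with ⟨k, hk, rfl⟩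
    have hgd : ps.getD k 0 = ps[k] := List.getD_eq_getElem ps 0 hk
    have hkj : j' ≤ k := by
      by_contra hlt
      have := hinv k (by omega)
      rw [hgd] at this; omega
    have h1 : j' < ps.length := by omega
    have := pvGetD_mono ps hps hkj hk
    rw [hgd] at this
    exact ⟨h1, by omega⟩

lemma pvSweep_eq (ps : List Int) (d : Int) (hps : ps.Pairwise (· < ·)) :
    ∀ (anchors : List Int) (j : Nat) (good : List Int),
      anchors.Pairwise (· ≤ ·) →
      (∀ k < j, ∀ a ∈ anchors, ps.getD k 0 < a - d) →
      pvSweep ps d anchors j good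
        = good ++ anchors.filter (fun a => ps.any (fun p => decide (|a - p| ≤ d))) := by
  intro anchors
  induction anchors with
  | nil => intro j good _ _; simp [pvSweep]
  | cons a as ih =>
    intro j good hsort hinv
    have hinv' : ∀ k < pvAdvance ps (a - d) j, ps.getD k 0 < a - d :=
      pvAdvance_inv ps (a - d) j (fun k hk => hinv k hk a (by simp))
    have hstop := pvAdvance_stop ps (a - d) j
    have hcond := pvCond_iff ps d a (pvAdvance ps (a - d) j) hps hinv' hstop
    have hinvas : ∀ k < pvAdvance ps (a - d) j, ∀ a' ∈ as, ps.getD k 0 < a' - d := by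
      intro k hk a' ha'
      have h1 := hinv' k hk
      have h2 : a ≤ a' := (List.pairwise_cons.mp hsort).1 a' ha'
      omega
    have hsort' := (List.pairwise_cons.mp hsort).2
    cases hb : ps.any (fun p => decide (|a - p| ≤ d)) with
    | true =>
      simp only [pvSweep]
      rw [if_pos (hcond.mpr hb), ih _ _ hsort' hinvas]
      simp [hb]
    | false =>
      simp only [pvSweep]
      rw [if_neg (fun hc => by rw [hcond.mp hc] at hb; cases hb), ih _ _ hsort' hinvas]
      simp [hb]

lemma pvAnyTrue (l : List Int) : l.any (fun _ => true) = !l.isEmpty := by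
  cases l <;> simp

lemma pvAllNot {α : Type} (l : List α) (p : α → Bool) :
    l.all (fun x => !p x) = !l.any p := by
  induction l with
  | nil => rfl
  | cons x xs ih => simp [ih]

lemma pvLoopB_eq (dws : List String) (d : Int) :
    ∀ (ws : List String) (anchors : List Int), anchors.Pairwise (· ≤ ·) →
      pvLoopB dws d ws anchors
        = (ws.all (fun w => !(pvPosListB dws w).isEmpty)
           && anchors.any (fun a => ws.all (fun w =>
                (pvPosListB dws w).any (fun p => decide (|a - p| ≤ d))))) := by
  intro ws
  induction ws with
  | nil => intro anchors _; simp [pvLoopB, pvAnyTrue]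
  | cons w ws ih =>
    intro anchors hsort
    by_cases h : (pvPosListB dws w).isEmpty
    · simp [pvLoopB, h]
    · rw [pvLoopB]
      simp only [h]
      rw [pvSweep_eq _ _ (pvPosListB_pairwise dws w) anchors 0 []
            hsort (by intro k hk; omega),
        List.nil_append, ih _ (List.Pairwise.filter _ hsort)]
      rw [List.any_filter]
      simp [List.all_cons, h]

-- ===== VERDICT (by name: the statement is the Claim_ definition above) =====
theorem check_word_proximity_spec : Claim_equal_check_word_proximity := by
  intro description words max_distance _
  unfold Spec_check_word_proximity check_word_proximity check_word_proximity_alt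
  by_cases hlen : words.length ≤ 1
  · simp [hlen]
  · cases words with
    | nil => simp at hlen
    | cons w0 rest =>
      simp only [hlen, if_false]
      set dws := PySem.Str.split₀ (PySem.Str.lower description) with hdws
      have hget : ∀ u ∈ w0 :: rest,
          ((w0 :: rest).foldl (fun d word => d.insert word (pvPosListA dws word))
            PySem.Dict.empty).getD u [] = pvPosListB dws u := by
        intro u hu
        rw [pvDict_getD dws (w0 :: rest) u PySem.Dict.empty, if_pos hu]
      rw [pvLoopB_eq dws max_distance rest (pvPosListB dws w0)
            ((pvPosListB_pairwise dws w0).imp le_of_lt)]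
      by_cases hP0 : (pvPosListB dws w0).isEmpty
      · -- B returns false; A's missing-word check fires on w0
        have hmiss : ((w0 :: rest).any (fun word =>
            (((w0 :: rest).foldl (fun d word => d.insert word (pvPosListA dws word))
              PySem.Dict.empty).getD word []).isEmpty)) = true := by
          refine List.any_eq_true.mpr ⟨w0, by simp, ?_⟩
          rw [hget w0 (by simp)]; exact hP0
        rw [hmiss, hP0, if_pos rfl, if_pos rfl]
      · rw [if_neg hP0]
        have hany : ((w0 :: rest).any (fun word =>
            (((w0 :: rest).foldl (fun d word => d.insert word (pvPosListA dws word))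
              PySem.Dict.empty).getD word []).isEmpty))
            = rest.any (fun w => (pvPosListB dws w).isEmpty) := by
          simp only [List.any_cons, hget w0 (by simp), hP0, Bool.false_or]
          exact pvAnyCongr rest _ _ (fun w hw => by rw [hget w (by simp [hw])])
        rw [hany]
        by_cases hmiss : rest.any (fun w => (pvPosListB dws w).isEmpty) = true
        · rw [if_pos hmiss]
          have hall : rest.all (fun w => !(pvPosListB dws w).isEmpty) = false := by
            rw [pvAllNot, hmiss]; rfl
          rw [hall, Bool.false_and]
        · have hall : rest.all (fun w => !(pvPosListB dws w).isEmpty) = true := by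
            rw [pvAllNot]; simp [hmiss]
          rw [if_neg hmiss, hall, Bool.true_and]
          by_cases h2 : (w0 :: rest).length = 2
          · -- rest is a single word; the two nested anys equal the anchor formula
            match rest, h2 with
            | [w1], _ =>
              have hg : ∀ u ∈ ([w0, w1] : List String),
                  (([w0, w1] : List String).foldl
                    (fun d word => d.insert word (pvPosListA dws word))
                    PySem.Dict.empty).getD u [] = pvPosListB dws u := fun u hu => by
                rw [pvDict_getD dws [w0, w1] u PySem.Dict.empty, if_pos hu]
              rw [if_pos (show ((w0 :: [w1]).length == 2) = true from rfl),
                hg w0 (by simp)]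
              refine pvAnyCongr _ _ _ (fun a _ => ?_)
              simp [pvPosList_eq]
          · rw [if_neg (fun hc => h2 (by simpa using hc)), hget w0 (by simp)]
            refine pvAnyCongr _ _ _ (fun a _ => ?_)
            refine pvAllCongr _ _ _ (fun w hw => ?_)
            rw [hget w (by simp [hw])]
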